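-- pv_equiv track=rewrite | github.com/misaka0502/LIBERO | scripts/create_pcd_dataset.py | mesh_name_matches_allowed
-- ===== SOURCE A (Python) =====
-- def sanitize_name(name):
--     return "".join(ch if ch.isalnum() or ch == "_" else "_" for ch in name.strip().lower())
--
-- def mesh_name_matches_allowed(mesh_name, allowed_names):
--     mesh_norm = sanitize_name(mesh_name)
--     if not allowed_names:
--         return True
--     if mesh_norm in allowed_names:
--         return True
--     for allowed in allowed_names:
--         if mesh_norm.endswith(f"_{allowed}"):
--             return True
--     return False
-- ===== SOURCE B (Python) =====
-- def sanitize_name(name):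
--     return "".join(ch if ch.isalnum() or ch == "_" else "_" for ch in name.strip().lower())
--
-- def mesh_name_matches_allowed(mesh_name, allowed_names):
--     mesh_norm = sanitize_name(mesh_name)
--     if not allowed_names:
--         return True
--     allowed_set = set(allowed_names)
--     if mesh_norm in allowed_set:
--         return True
--     for i, ch in enumerate(mesh_norm):
--         if ch == "_" and mesh_norm[i + 1:] in allowed_set:
--             return True
--     return False
-- ===== Notes on version B (the rewrite author's own statement) =====
-- stated objective: alternative
-- what changed: Instead of scanning the allowed list and testing endswith('_'+allowed) for each entry, B builds a set of the allowed names once and walks the mesh string's underscore positions, testing each suffix after an underscore for set membership.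
import Mathlib
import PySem

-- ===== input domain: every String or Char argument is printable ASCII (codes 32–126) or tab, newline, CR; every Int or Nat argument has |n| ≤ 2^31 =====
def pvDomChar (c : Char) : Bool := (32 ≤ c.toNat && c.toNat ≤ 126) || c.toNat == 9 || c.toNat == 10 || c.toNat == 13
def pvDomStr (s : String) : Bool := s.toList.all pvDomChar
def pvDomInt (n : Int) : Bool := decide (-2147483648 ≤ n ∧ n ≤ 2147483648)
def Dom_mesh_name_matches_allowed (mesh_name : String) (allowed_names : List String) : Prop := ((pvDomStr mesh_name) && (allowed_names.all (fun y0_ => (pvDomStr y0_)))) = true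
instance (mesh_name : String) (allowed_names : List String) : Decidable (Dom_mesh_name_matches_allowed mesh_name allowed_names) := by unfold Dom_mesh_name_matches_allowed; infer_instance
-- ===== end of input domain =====

-- B replaces A's scan of the allowed list with endswith tests by one set built from the
-- allowed names and a walk over the mesh string's underscore positions testing suffix
-- membership (alternative decomposition; same results).


-- ===== PORT A =====
-- sanitize_name: strip, lower, then keep alnum/underscore chars and replace the rest by '_'
-- (shared helper: Source B reuses sanitize_name unchanged)
def pvSanitize (name : String) : List Char :=
  (PySem.Chars.lower (PySem.Chars.strip name.toList)).map
    (fun ch => if PySem.Chars.isalnum ch || ch == '_' then ch else '_')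

def mesh_name_matches_allowed (mesh_name : String) (allowed_names : List String) : Bool :=
  let mesh_norm := pvSanitize mesh_name
  if allowed_names = [] then true
  else if allowed_names.any (fun a => a.toList == mesh_norm) then true
  else allowed_names.any (fun a => PySem.Chars.endswith mesh_norm ('_' :: a.toList))

-- ===== PORT B =====
-- the `for i, ch in enumerate(mesh_norm): if ch == "_" and mesh_norm[i+1:] in allowed_set`
-- loop: at each cons, the slice mesh_norm[i+1:] is exactly the tail
def pvScan (s : PySem.Set (List Char)) : List Char → Bool
  | [] => false
  | c :: rest =>
      if c == '_' && PySem.Set.contains s rest then true else pvScan s rest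

def mesh_name_matches_allowed_alt (mesh_name : String) (allowed_names : List String) : Bool :=
  let mesh_norm := pvSanitize mesh_name
  if allowed_names = [] then true
  else
    let allowed_set := PySem.Set.ofList (allowed_names.map (fun a => a.toList))
    if PySem.Set.contains allowed_set mesh_norm then true
    else pvScan allowed_set mesh_norm

-- ===== PRECONDITION & SPEC =====
def Spec_mesh_name_matches_allowed (mesh_name : String) (allowed_names : List String) (out : Bool) : Prop := out = mesh_name_matches_allowed_alt mesh_name allowed_names
instance (mesh_name : String) (allowed_names : List String) (out : Bool) : Decidable (Spec_mesh_name_matches_allowed mesh_name allowed_names out) := by unfold Spec_mesh_name_matches_allowed; infer_instance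

-- ===== CLAIM (what is proved, stated in full; the proofs are below) =====
def Claim_equal_mesh_name_matches_allowed : Prop := ∀ (mesh_name : String) (allowed_names : List String), Dom_mesh_name_matches_allowed mesh_name allowed_names → Spec_mesh_name_matches_allowed mesh_name allowed_names (mesh_name_matches_allowed mesh_name allowed_names)

-- ===== LEMMAS AND PROOFS =====
lemma contains_ofList_iff {α : Type} [BEq α] [LawfulBEq α] (xs : List α) (x : α) :
    PySem.Set.contains (PySem.Set.ofList xs) x = true ↔ x ∈ xs := by
  simp [PySem.Set.contains, PySem.Set.mem_ofList]

lemma pvScan_iff (s : PySem.Set (List Char)) (cs : List Char) :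
    pvScan s cs = true ↔ ∃ r, PySem.Set.contains s r = true ∧ '_' :: r <:+ cs := by
  induction cs with
  | nil => simp [pvScan]
  | cons c rest ih =>
      rw [show pvScan s (c :: rest)
            = if c == '_' && PySem.Set.contains s rest then true else pvScan s rest from rfl]
      by_cases hc : (c == '_' && PySem.Set.contains s rest) = true
      · rw [if_pos hc]
        obtain ⟨h1, h2⟩ := Bool.and_eq_true_iff.mp hc
        simp only [true_iff]
        refine ⟨rest, h2, ?_⟩
        rw [eq_of_beq h1]
      · rw [if_neg hc, ih]
        constructor
        · rintro ⟨r, h1, h2⟩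
          exact ⟨r, h1, h2.trans (List.suffix_cons c rest)⟩
        · rintro ⟨r, h1, h2⟩
          rcases List.suffix_cons_iff.mp h2 with heq | h2'
          · injection heq with e1 e2
            exfalso
            apply hc
            rw [Bool.and_eq_true_iff]
            subst e2
            exact ⟨by simp [← e1], h1⟩
          · exact ⟨r, h1, h2'⟩

-- ===== VERDICT (by name: the statement is the Claim_ definition above) =====
theorem mesh_name_matches_allowed_spec : Claim_equal_mesh_name_matches_allowed := by
  intro m al _
  unfold Spec_mesh_name_matches_allowed
  by_cases hal : al = []
  · subst hal; rfl
  · simp only [mesh_name_matches_allowed, mesh_name_matches_allowed_alt]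
    rw [if_neg hal, if_neg hal]
    have hmem : (al.any (fun a => a.toList == pvSanitize m))
        = PySem.Set.contains (PySem.Set.ofList (al.map (fun a => a.toList))) (pvSanitize m) := by
      rw [Bool.eq_iff_iff, contains_ofList_iff, List.any_eq_true]
      constructor
      · rintro ⟨a, ha, hb⟩
        exact List.mem_map.mpr ⟨a, ha, eq_of_beq hb⟩
      · intro h
        rcases List.mem_map.mp h with ⟨a, ha, he⟩
        exact ⟨a, ha, beq_iff_eq.mpr he⟩
    rw [hmem]
    by_cases hm : PySem.Set.contains (PySem.Set.ofList (al.map (fun a => a.toList)))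
        (pvSanitize m) = true
    · rw [if_pos hm, if_pos hm]
    · rw [if_neg hm, if_neg hm]
      rw [Bool.eq_iff_iff, List.any_eq_true, pvScan_iff]
      constructor
      · rintro ⟨a, ha, he⟩
        refine ⟨a.toList, ?_, ?_⟩
        · exact (contains_ofList_iff _ _).mpr (List.mem_map_of_mem ha)
        · exact (PySem.Chars.endswith_iff _ _).mp he
      · rintro ⟨r, hr, hs⟩
        rcases List.mem_map.mp ((contains_ofList_iff _ _).mp hr) with ⟨a, ha, rfl⟩
        exact ⟨a, ha, (PySem.Chars.endswith_iff _ _).mpr hs⟩
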